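-- pv_equiv track=rewrite | github.com/rssbroker/sales-data-bot-database-updater | list_corrector.py | restore_strings
-- ===== SOURCE A (Python) =====
-- from collections import Counter
--
-- def find_mapping(string_a, string_b):
--     if len(string_a) < len(string_b):
--         string_a = ("0" * (len(string_b)-len(string_a))) + string_a
--     elif len(string_a) > len(string_b):
--         string_a = string_a[-len(string_b):-1]
--     mapping = {}
--     for char_a, char_b in zip(string_a, string_b):
--         mapping[char_b] = char_a
--     return mapping
--
-- def restore_strings(list_a, list_b):
--     # Use the mapping from the first pair of strings
--     initial_mapping = find_mapping(list_a[0], list_b[0])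
--
--     # Create a mapping candidates dictionary based on characters in List A and List B
--     mapping_candidates = {}
--     for string_a, string_b in zip(list_a, list_b):
--         for char_a, char_b in zip(string_a, string_b):
--             if char_b not in mapping_candidates:
--                 mapping_candidates[char_b] = Counter()
--
--             mapping_candidates[char_b][char_a] += 1
--
--     # Use the most common mapping for each character in List B
--     final_mapping = {char_b: counter.most_common(
--         1)[0][0] for char_b, counter in mapping_candidates.items()}
--
--     # Use the final mapping to restore the original strings
--     restored_list_b = [''.join(final_mapping.get(char, char)
--                                for char in string_b) for string_b in list_b]
--
--     return restored_list_b
-- ===== SOURCE B (Python) =====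
-- def restore_strings(list_a, list_b):
--     # Different decomposition: flatten all aligned (target, source) char pairs
--     # once, then for each target char (first time seen) pick its replacement by
--     # max-by-count over the distinct sources in first-seen order; Python's max
--     # keeps the first maximal candidate, which is most_common's tie-break.
--     # No Counter objects and no per-target counting dicts are built.
--     pairs = [(cb, ca)
--              for sa, sb in zip(list_a, list_b)
--              for ca, cb in zip(sa, sb)]
--     mapping = {}
--     for cb, _ in pairs:
--         if cb not in mapping:
--             srcs = [a for b, a in pairs if b == cb]
--             mapping[cb] = max(dict.fromkeys(srcs), key=srcs.count)
--     return [''.join(mapping.get(c, c) for c in sb) for sb in list_b]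
-- ===== Notes on version B (the rewrite author's own statement) =====
-- stated objective: alternative
-- what changed: B builds no counting structures at all: it flattens the aligned (target, source) char pairs into one list and, for each target char the first time it is seen, rescans that list to pick the replacement with max(dict.fromkeys(srcs), key=srcs.count), instead of A's dict-of-Counters pass plus per-key most_common.
import Mathlib
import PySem

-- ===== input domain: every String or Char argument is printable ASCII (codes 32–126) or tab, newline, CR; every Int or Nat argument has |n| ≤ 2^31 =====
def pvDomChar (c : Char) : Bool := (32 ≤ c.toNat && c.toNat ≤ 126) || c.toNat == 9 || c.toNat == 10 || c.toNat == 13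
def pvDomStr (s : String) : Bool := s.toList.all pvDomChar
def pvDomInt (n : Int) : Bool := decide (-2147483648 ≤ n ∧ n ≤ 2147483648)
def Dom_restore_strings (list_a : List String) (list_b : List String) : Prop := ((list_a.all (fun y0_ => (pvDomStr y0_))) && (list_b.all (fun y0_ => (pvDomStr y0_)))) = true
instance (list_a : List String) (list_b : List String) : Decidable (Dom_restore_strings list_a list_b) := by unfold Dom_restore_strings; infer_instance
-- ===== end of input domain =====

-- B drops the dict-of-Counters and most_common: it flattens the aligned char pairs once and,
-- per first-seen target char, picks the replacement by max-by-count over the distinct sources.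

-- ===== PORT A =====
-- find_mapping, ported literally; its result is bound and unused in restore_strings, as in A.
def find_mapping (string_a : String) (string_b : String) : PySem.Dict Char Char :=
  let sa := string_a.toList
  let sb := string_b.toList
  let sa :=
    if sa.length < sb.length then List.replicate (sb.length - sa.length) '0' ++ sa
    else if sb.length < sa.length then
      PySem.List.slice sa (some (-(sb.length : Int))) (some (-1))
    else sa
  (sa.zip sb).foldl (fun m p => m.insert p.2 p.1) PySem.Dict.empty

def restore_strings (list_a : List String) (list_b : List String) : List String :=
  match PySem.List.pyGet? list_a 0, PySem.List.pyGet? list_b 0 with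
  | some a0, some b0 =>
    let _initial_mapping := find_mapping a0 b0
    let mapping_candidates : PySem.Dict Char (PySem.Dict Char Int) :=
      (list_a.zip list_b).foldl (fun mc p =>
        (p.1.toList.zip p.2.toList).foldl (fun mc q =>
          let mc := if mc.contains q.2 then mc else mc.insert q.2 PySem.Dict.empty
          mc.modify q.2 PySem.Dict.empty (fun ctr => ctr.modify q.1 0 (· + 1))) mc)
        PySem.Dict.empty
    -- counter.most_common(1)[0][0] = head of the stable reverse sort of the items by count;
    -- the counters built above are never empty, so headD's default is unreachable.
    let final_mapping : PySem.Dict Char Char :=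
      mapping_candidates.items.foldl (fun d p =>
        d.insert p.1 (((PySem.List.sorted p.2.items (fun q => q.2) true).headD ('0', 0)).1))
        PySem.Dict.empty
    -- ''.join over one-char strings = String.ofList of the chars (exact)
    list_b.map (fun sb => String.ofList (sb.toList.map (fun ch => final_mapping.getD ch ch)))
  | _, _ => []   -- Python raises IndexError here (outside Pre_)

-- ===== PORT B =====
def restore_strings_alt (list_a : List String) (list_b : List String) : List String :=
  let pairs : List (Char × Char) :=
    (list_a.zip list_b).flatMap (fun p => (p.1.toList.zip p.2.toList).map (fun q => (q.2, q.1)))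
  let mapping : PySem.Dict Char Char :=
    pairs.foldl (fun m p =>
      if m.contains p.1 then m
      else
        let srcs := (pairs.filter (fun q => q.1 == p.1)).map (·.2)
        -- max(dict.fromkeys(srcs), key=srcs.count); srcs is never empty where this runs,
        -- so the getD default is unreachable (Python's max would raise only on empty).
        m.insert p.1 ((PySem.List.max? (PySem.List.dedup srcs)
          (fun a => (srcs.count a : Int))).getD p.2))
      PySem.Dict.empty
  list_b.map (fun sb => String.ofList (sb.toList.map (fun ch => mapping.getD ch ch)))

-- ===== PRECONDITION & SPEC =====
-- A evaluates list_a[0] and list_b[0]; on an empty list either access raises IndexError.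
def Pre_restore_strings (list_a : List String) (list_b : List String) : Prop :=
  list_a ≠ [] ∧ list_b ≠ []
instance (list_a : List String) (list_b : List String) : Decidable (Pre_restore_strings list_a list_b) := by unfold Pre_restore_strings; infer_instance

def pvWitness_restore_strings : List String × List String := (["abba"], ["XXXX"])

def Spec_restore_strings (list_a : List String) (list_b : List String) (out : List String) : Prop := out = restore_strings_alt list_a list_b
instance (list_a : List String) (list_b : List String) (out : List String) : Decidable (Spec_restore_strings list_a list_b out) := by unfold Spec_restore_strings; infer_instance

-- ===== CLAIM (what is proved, stated in full; the proofs are below) =====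
def Claim_equal_restore_strings : Prop := ∀ (list_a : List String) (list_b : List String), Dom_restore_strings list_a list_b → Pre_restore_strings list_a list_b → Spec_restore_strings list_a list_b (restore_strings list_a list_b)

-- ===== LEMMAS AND PROOFS =====

-- A's inner counting step over one aligned char pair (named so the folds can be reasoned about)
def pvStepA (mc : PySem.Dict Char (PySem.Dict Char Int)) (q : Char × Char) : PySem.Dict Char (PySem.Dict Char Int) :=
  let mc := if mc.contains q.2 then mc else mc.insert q.2 PySem.Dict.empty
  mc.modify q.2 PySem.Dict.empty (fun ctr => ctr.modify q.1 0 (· + 1))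

lemma pvStepA_getD (mc : PySem.Dict Char (PySem.Dict Char Int)) (q : Char × Char) (cb : Char) :
    (pvStepA mc q).getD cb PySem.Dict.empty =
      if q.2 = cb then (mc.getD cb PySem.Dict.empty).modify q.1 0 (· + 1)
      else mc.getD cb PySem.Dict.empty := by
  unfold pvStepA
  by_cases h : q.2 = cb
  · subst h
    by_cases hc : mc.contains q.2
    · rw [if_pos hc, PySem.Dict.getD_modify]
    · simp only [Bool.not_eq_true] at hc
      rw [if_neg (by simp [hc]), PySem.Dict.getD_modify,
        PySem.Dict.getD_insert, PySem.Dict.getD_of_not_contains mc _ hc]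
      simp
  · by_cases hc : mc.contains q.2
    · rw [if_pos hc, PySem.Dict.getD_modify, if_neg (Ne.symm h), if_neg h]
    · rw [if_neg (by simp [hc]), PySem.Dict.getD_modify, if_neg (Ne.symm h),
        PySem.Dict.getD_insert, if_neg (Ne.symm h), if_neg h]

lemma pvFoldA_getD (P : List (Char × Char)) (mc : PySem.Dict Char (PySem.Dict Char Int)) (cb : Char) :
    (P.foldl pvStepA mc).getD cb PySem.Dict.empty =
      ((P.filter (fun q => q.2 == cb)).map (·.1)).foldl
        (fun d ca => d.modify ca 0 (· + 1)) (mc.getD cb PySem.Dict.empty) := by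
  induction P generalizing mc with
  | nil => rfl
  | cons q P ih =>
    simp only [List.foldl_cons, ih, List.filter_cons]
    by_cases h : q.2 = cb
    · simp [h, pvStepA_getD]
    · simp [h, pvStepA_getD]

lemma pvStepA_contains (mc : PySem.Dict Char (PySem.Dict Char Int)) (q : Char × Char) (cb : Char) :
    (pvStepA mc q).contains cb = (mc.contains cb || q.2 == cb) := by
  unfold pvStepA
  by_cases hc : mc.contains q.2
  · rw [if_pos hc, PySem.Dict.contains_modify]
    by_cases h : cb = q.2
    · subst h; simp
    · simp [beq_eq_false_iff_ne.mpr h, beq_eq_false_iff_ne.mpr (Ne.symm h)]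
  · rw [if_neg (by simp [hc]), PySem.Dict.contains_modify, PySem.Dict.contains_insert]
    by_cases h : cb = q.2
    · subst h; simp
    · simp [beq_eq_false_iff_ne.mpr h, beq_eq_false_iff_ne.mpr (Ne.symm h)]

lemma pvFoldA_contains (P : List (Char × Char)) (mc : PySem.Dict Char (PySem.Dict Char Int)) (cb : Char) :
    (P.foldl pvStepA mc).contains cb = (mc.contains cb || P.any (fun q => q.2 == cb)) := by
  induction P generalizing mc with
  | nil => simp
  | cons q P ih => simp [ih, pvStepA_contains, Bool.or_assoc]

lemma pvStepA_nodup (mc : PySem.Dict Char (PySem.Dict Char Int)) (q : Char × Char)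
    (h : mc.keys.Nodup) : (pvStepA mc q).keys.Nodup := by
  unfold pvStepA
  by_cases hc : mc.contains q.2
  · rw [if_pos hc, PySem.Dict.keys_modify]
    exact PySem.Dict.nodup_keys_insert _ _ _ h
  · rw [if_neg (by simp [hc]), PySem.Dict.keys_modify]
    exact PySem.Dict.nodup_keys_insert _ _ _ (PySem.Dict.nodup_keys_insert _ _ _ h)

lemma pvFoldA_nodup (P : List (Char × Char)) (mc : PySem.Dict Char (PySem.Dict Char Int))
    (h : mc.keys.Nodup) : (P.foldl pvStepA mc).keys.Nodup := by
  induction P generalizing mc with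
  | nil => exact h
  | cons q P ih => exact ih _ (pvStepA_nodup _ _ h)

-- first-extremal running max over (element, count) pairs — the shape shared by
-- sorted(...,reverse=True)[0] on the A side and max(key=...) on the B side
def pvScan (o : Option (Char × Int)) (l : List (Char × Int)) : Option (Char × Int) :=
  l.foldl (fun o x => match o with
    | none => some x
    | some w => if w.2 < x.2 then some x else some w) o

lemma pvHead?_insertBy {α : Type} (bef : α → α → Bool) (x : α) (a : List α) :
    (PySem.List.insertBy bef x a).head? =
      some (match a with | [] => x | y :: _ => if bef x y then x else y) := by
  cases a with
  | nil => simp [PySem.List.insertBy]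
  | cons y ys =>
    simp only [PySem.List.insertBy]
    split <;> simp_all

lemma pvSorted_aux (l acc : List (Char × Int)) :
    (l.foldl (fun acc x => PySem.List.insertBy (fun a b => decide (b.2 < a.2)) x acc) acc).head? =
      pvScan acc.head? l := by
  induction l generalizing acc with
  | nil => rfl
  | cons x l ih =>
    rw [List.foldl_cons, ih, pvHead?_insertBy]
    cases acc with
    | nil => rfl
    | cons y t =>
      have h2 : pvScan ((y :: t).head?) (x :: l) =
          pvScan (if y.2 < x.2 then some x else some y) l := rfl
      rw [h2]
      by_cases h : y.2 < x.2 <;> simp [h]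

lemma pvSorted_rev_head? (l : List (Char × Int)) :
    (PySem.List.sorted l (fun q => q.2) true).head? = pvScan none l := by
  rw [PySem.List.sorted_rev_eq_foldl_insertBy]
  exact pvSorted_aux l []

-- B's max(dict.fromkeys(srcs), key=srcs.count) is pvScan over the (element, count) pairs
lemma pvScan_max?_some (k : Char → Int) (L : List Char) : ∀ m : Char,
    pvScan (some (m, k m)) (L.map (fun a => (a, k a))) =
      (PySem.List.max? (m :: L) k).map (fun a => (a, k a)) := by
  induction L with
  | nil => intro m; rfl
  | cons x L ih =>
    intro m
    have hL : pvScan (some (m, k m)) ((x :: L).map (fun a => (a, k a))) =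
        pvScan (if k m < k x then some (x, k x) else some (m, k m))
          (L.map (fun a => (a, k a))) := rfl
    have hR : PySem.List.max? (m :: x :: L) k =
        PySem.List.max? ((if k m < k x then x else m) :: L) k := by
      by_cases h : k m < k x <;> simp [h, PySem.List.max?]
    rw [hL, hR]
    by_cases h : k m < k x
    · rw [if_pos h, if_pos h]; exact ih x
    · rw [if_neg h, if_neg h]; exact ih m

lemma pvMax?_eq_pvScan (L : List Char) (k : Char → Int) :
    (PySem.List.max? L k).map (fun a => (a, k a)) = pvScan none (L.map (fun a => (a, k a))) := by
  cases L with
  | nil => rfl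
  | cons x L => exact (pvScan_max?_some k L x).symm

-- B's insert-if-absent loop: first pair with the key wins
lemma pvFoldB_get? (l : List (Char × Char)) (F : Char × Char → Char)
    (m : PySem.Dict Char Char) (ch : Char) :
    (l.foldl (fun m p => if m.contains p.1 then m else m.insert p.1 (F p)) m).get? ch =
      match m.get? ch with
      | some v => some v
      | none => (l.find? (fun p => p.1 == ch)).map F := by
  induction l generalizing m with
  | nil => cases hm : m.get? ch <;> simp [hm]
  | cons p l ih =>
    rw [List.foldl_cons, ih]
    by_cases h : p.1 = ch
    · subst h
      by_cases hc : m.contains p.1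
      · rw [if_pos hc]
        have hs : (m.get? p.1).isSome := by rw [← PySem.Dict.contains_eq_isSome_get?]; exact hc
        obtain ⟨v, hv⟩ := Option.isSome_iff_exists.mp hs
        rw [hv]
      · rw [if_neg hc]
        have hnone : m.get? p.1 = none := by
          cases hg : m.get? p.1 with
          | none => rfl
          | some v =>
            exfalso
            rw [PySem.Dict.contains_eq_isSome_get?, hg] at hc
            exact hc rfl
        rw [PySem.Dict.get?_insert, if_pos rfl, hnone,
          List.find?_cons_of_pos (by simp)]
        rfl
    · have hne : ch ≠ p.1 := fun hh => h hh.symm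
      by_cases hc : m.contains p.1
      · rw [if_pos hc, List.find?_cons_of_neg (by simp [h])]
      · rw [if_neg hc, PySem.Dict.get?_insert, if_neg hne,
          List.find?_cons_of_neg (by simp [h])]

-- the swapped-and-filtered source list on the B side is A's per-target source list
lemma pvSrcs_eq (P : List (Char × Char)) (ch : Char) :
    (((P.map (fun q => (q.2, q.1))).filter (fun q => q.1 == ch)).map (·.2)) =
      (P.filter (fun q => q.2 == ch)).map (·.1) := by
  rw [List.filter_map, List.map_map]
  rfl

-- central per-character equality of the two lookup tables
lemma pvCentral (P : List (Char × Char)) (ch : Char) :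
    ((P.foldl pvStepA PySem.Dict.empty).items.foldl
        (fun d p => d.insert p.1 (((PySem.List.sorted p.2.items (fun q => q.2) true).headD ('0', 0)).1))
        PySem.Dict.empty).getD ch ch
    = ((P.map (fun q => (q.2, q.1))).foldl (fun m p =>
        if m.contains p.1 then m
        else
          let srcs := (((P.map (fun q => (q.2, q.1))).filter (fun q => q.1 == p.1)).map (·.2))
          m.insert p.1 ((PySem.List.max? (PySem.List.dedup srcs)
            (fun a => (srcs.count a : Int))).getD p.2)) PySem.Dict.empty).getD ch ch := by
  have hmcD : (P.foldl pvStepA PySem.Dict.empty).getD ch PySem.Dict.empty =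
      PySem.Dict.counter ((P.filter (fun q => q.2 == ch)).map (·.1)) := by
    rw [pvFoldA_getD, PySem.Dict.getD_empty, PySem.Dict.counter_eq_foldl]
  have hnd : (P.foldl pvStepA PySem.Dict.empty).keys.Nodup :=
    pvFoldA_nodup _ _ PySem.Dict.nodup_keys_empty
  have hcont : (P.foldl pvStepA PySem.Dict.empty).contains ch = P.any (fun q => q.2 == ch) := by
    rw [pvFoldA_contains, PySem.Dict.contains_empty, Bool.false_or]
  -- the B-side lookup, via pvFoldB_get?
  have hB : ((P.map (fun q => (q.2, q.1))).foldl (fun m p =>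
        if m.contains p.1 then m
        else
          let srcs := (((P.map (fun q => (q.2, q.1))).filter (fun q => q.1 == p.1)).map (·.2))
          m.insert p.1 ((PySem.List.max? (PySem.List.dedup srcs)
            (fun a => (srcs.count a : Int))).getD p.2)) PySem.Dict.empty).get? ch =
      ((P.map (fun q => (q.2, q.1))).find? (fun p => p.1 == ch)).map (fun p =>
        let srcs := (((P.map (fun q => (q.2, q.1))).filter (fun q => q.1 == p.1)).map (·.2))
        (PySem.List.max? (PySem.List.dedup srcs)
          (fun a => (srcs.count a : Int))).getD p.2) := by
    rw [pvFoldB_get?, PySem.Dict.get?_empty]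
  -- shared structure of the A-side final_mapping
  have hfm_items : ((P.foldl pvStepA PySem.Dict.empty).items.foldl
      (fun d p => d.insert p.1 (((PySem.List.sorted p.2.items (fun q => q.2) true).headD ('0', 0)).1))
      PySem.Dict.empty).items
      = (P.foldl pvStepA PySem.Dict.empty).items.map
        (fun p => (p.1, ((PySem.List.sorted p.2.items (fun q => q.2) true).headD ('0', 0)).1)) := by
    rw [PySem.Dict.items_foldl_insert_fresh
      ((P.foldl pvStepA PySem.Dict.empty).items)
      (fun p => p.1)
      (fun p => ((PySem.List.sorted p.2.items (fun q => q.2) true).headD ('0', 0)).1)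
      PySem.Dict.empty
      (fun a _ => PySem.Dict.contains_empty _) hnd]
    rfl
  have hfmkeys : ((P.foldl pvStepA PySem.Dict.empty).items.foldl
      (fun d p => d.insert p.1 (((PySem.List.sorted p.2.items (fun q => q.2) true).headD ('0', 0)).1))
      PySem.Dict.empty).keys = (P.foldl pvStepA PySem.Dict.empty).keys := by
    show _root_.List.map _ _ = _
    rw [hfm_items, List.map_map]
    rfl
  by_cases hany : P.any (fun q => q.2 == ch)
  · -- ch is a target character somewhere: both sides return the argmax-by-count source
    set S := (P.filter (fun q => q.2 == ch)).map (·.1) with hSdef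
    have hSne : S ≠ [] := by
      obtain ⟨q, hqP, hq2⟩ := List.any_eq_true.mp hany
      intro hnil
      rw [hSdef, List.map_eq_nil_iff, List.filter_eq_nil_iff] at hnil
      exact hnil q hqP hq2
    -- A side value
    have hitem : (ch, PySem.Dict.counter S) ∈ (P.foldl pvStepA PySem.Dict.empty).items := by
      rw [PySem.Dict.items_eq_map_keys _ hnd PySem.Dict.empty]
      exact List.mem_map.mpr ⟨ch,
        (PySem.Dict.contains_iff_mem_keys _ _).mp (by rw [hcont]; exact hany), by rw [hmcD]⟩
    have hfmitem : (ch, ((PySem.List.sorted (PySem.Dict.counter S).items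
          (fun q => q.2) true).headD ('0', 0)).1) ∈
        ((P.foldl pvStepA PySem.Dict.empty).items.foldl
          (fun d p => d.insert p.1 (((PySem.List.sorted p.2.items (fun q => q.2) true).headD ('0', 0)).1))
          PySem.Dict.empty).items := by
      rw [hfm_items]
      exact List.mem_map.mpr ⟨_, hitem, rfl⟩
    have hfmnd : ((P.foldl pvStepA PySem.Dict.empty).items.foldl
        (fun d p => d.insert p.1 (((PySem.List.sorted p.2.items (fun q => q.2) true).headD ('0', 0)).1))
        PySem.Dict.empty).keys.Nodup := by rw [hfmkeys]; exact hnd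
    rw [PySem.Dict.getD_of_mem_items _ hfmitem hfmnd]
    -- B side: the find? succeeds at some pair whose key is ch
    have hfind : ∃ p0, (P.map (fun q => (q.2, q.1))).find? (fun p => p.1 == ch) = some p0 ∧
        p0.1 = ch ∧ p0 ∈ P.map (fun q => (q.2, q.1)) := by
      obtain ⟨q, hqP, hq2⟩ := List.any_eq_true.mp hany
      have hex : ∃ p ∈ P.map (fun q => (q.2, q.1)), (fun p : Char × Char => p.1 == ch) p := by
        exact ⟨(q.2, q.1), List.mem_map_of_mem hqP, hq2⟩
      obtain ⟨p0, hp0⟩ := List.find?_isSome.mpr hex |> Option.isSome_iff_exists.mp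
      exact ⟨p0, hp0, by simpa using List.find?_some hp0, List.mem_of_find?_eq_some hp0⟩
    obtain ⟨p0, hp0eq, hp0ch, hp0mem⟩ := hfind
    rw [PySem.Dict.getD_eq_get?_getD, hB, hp0eq]
    dsimp only [Option.map_some]
    rw [hp0ch, pvSrcs_eq, ← hSdef]
    -- max? on the nonempty dedup'd source list is some
    have hdne : PySem.List.dedup S ≠ [] := by
      obtain ⟨x, xs, hx⟩ := List.exists_cons_of_ne_nil hSne
      intro hnil
      have : x ∈ PySem.List.dedup S := (PySem.List.mem_dedup _ _).mpr (hx ▸ List.mem_cons_self)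
      rw [hnil] at this
      exact List.not_mem_nil this
    have hmax : ∃ mx, PySem.List.max? (PySem.List.dedup S) (fun a => (S.count a : Int)) = some mx := by
      cases hm : PySem.List.max? (PySem.List.dedup S) (fun a => (S.count a : Int)) with
      | none =>
        exact absurd (Iff.mp (PySem.List.max?_eq_none_iff (PySem.List.dedup S)
          (fun a => (S.count a : Int))) hm) hdne
      | some mx => exact ⟨mx, rfl⟩
    obtain ⟨mx, hmx⟩ := hmax
    -- A side: headD of the reverse sort of the counter items is the same mx
    have hAval : ((PySem.List.sorted (PySem.Dict.counter S).items (fun q => q.2) true).headD ('0', 0)).1 = mx := by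
      have hitems : (PySem.Dict.counter S).items =
          (PySem.List.dedup S).map (fun a => (a, (S.count a : Int))) := by
        rw [PySem.Dict.items_counter, PySem.List.dedup_eq_ofList]
      have hscan : pvScan none ((PySem.List.dedup S).map (fun a => (a, (S.count a : Int)))) =
          some (mx, (S.count mx : Int)) := by
        rw [← pvMax?_eq_pvScan, hmx]
        rfl
      rw [List.headD_eq_head?_getD, pvSorted_rev_head?, hitems, hscan]
      rfl
    rw [hAval, hmx]
    rfl
  · -- ch never occurs as a target: both sides fall back to ch itself
    have hc2 : (P.foldl pvStepA PySem.Dict.empty).contains ch = false := by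
      rw [hcont]; exact Bool.not_eq_true _ ▸ hany
    have hfmc : ((P.foldl pvStepA PySem.Dict.empty).items.foldl
        (fun d p => d.insert p.1 (((PySem.List.sorted p.2.items (fun q => q.2) true).headD ('0', 0)).1))
        PySem.Dict.empty).contains ch = false := by
      cases hq : ((P.foldl pvStepA PySem.Dict.empty).items.foldl
          (fun d p => d.insert p.1 (((PySem.List.sorted p.2.items (fun q => q.2) true).headD ('0', 0)).1))
          PySem.Dict.empty).contains ch
      · rfl
      · exfalso
        have := (PySem.Dict.contains_iff_mem_keys _ _).mp hq
        rw [hfmkeys] at this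
        rw [(PySem.Dict.contains_iff_mem_keys _ _).mpr this] at hc2
        exact Bool.true_eq_false.mp hc2
    rw [PySem.Dict.getD_of_not_contains _ _ hfmc]
    have hfnone : (P.map (fun q => (q.2, q.1))).find? (fun p => p.1 == ch) = none := by
      rw [List.find?_eq_none]
      intro p hp
      obtain ⟨q, hq, rfl⟩ := List.mem_map.mp hp
      simp only [beq_iff_eq]
      intro hqc
      exact absurd (List.any_eq_true.mpr ⟨q, hq, by simpa using hqc⟩) hany
    rw [PySem.Dict.getD_eq_get?_getD, hB, hfnone]
    rfl

lemma pvMain (la lb : List String) (h1 : la ≠ []) (h2 : lb ≠ []) :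
    restore_strings la lb = restore_strings_alt la lb := by
  obtain ⟨a0, la', rfl⟩ := List.exists_cons_of_ne_nil h1
  obtain ⟨b0, lb', rfl⟩ := List.exists_cons_of_ne_nil h2
  have hga : PySem.List.pyGet? (a0 :: la') 0 = some a0 := by
    simp
  have hgb : PySem.List.pyGet? (b0 :: lb') 0 = some b0 := by
    simp
  simp only [restore_strings, restore_strings_alt, hga, hgb]
  rw [show (fun (mc : PySem.Dict Char (PySem.Dict Char Int)) (q : Char × Char) =>
        let mc := if mc.contains q.2 then mc else mc.insert q.2 PySem.Dict.empty
        mc.modify q.2 PySem.Dict.empty (fun ctr => ctr.modify q.1 0 (· + 1))) = pvStepA from rfl]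
  rw [← List.foldl_flatMap (f := fun p : String × String => p.1.toList.zip p.2.toList)
      (g := pvStepA) (l := (a0 :: la').zip (b0 :: lb')) (init := PySem.Dict.empty)]
  rw [show ((a0 :: la').zip (b0 :: lb')).flatMap
        (fun p => (p.1.toList.zip p.2.toList).map (fun q => (q.2, q.1))) =
      (((a0 :: la').zip (b0 :: lb')).flatMap (fun p => p.1.toList.zip p.2.toList)).map
        (fun q => (q.2, q.1)) from by rw [List.map_flatMap]]
  have h12 := funext (pvCentral (((a0 :: la').zip (b0 :: lb')).flatMap
    (fun p => p.1.toList.zip p.2.toList)))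
  rw [h12]

-- ===== VERDICT (by name: the statement is the Claim_ definition above) =====
theorem restore_strings_spec : Claim_equal_restore_strings := by
  intro la lb _ hpre
  exact pvMain la lb hpre.1 hpre.2
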